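-- pv_equiv track=rewrite | github.com/NoCode-bench/NoCode-bench | construction/collection/collect_flask.py | normalize_href
-- ===== SOURCE A (Python) =====
-- def normalize_href(hrefs: list[str]):
--     norm_hrefs = []
--     has_pr = False
--     pull_url = 'https://github.com/pallets/flask/pull/'
--     issues_url = 'https://github.com/pallets/flask/issues/'
--     for href in hrefs:
--         href_type = -1
--         temp_id = ''
--         if pull_url in href:
--             href_type = 'pr'
--             has_pr = True
--             temp_id = href.replace(pull_url, '').strip()
--         elif issues_url in href:
--             href_type = 'issue'
--             temp_id = href.replace(issues_url, '').strip()
--         else: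
--             continue
--         norm_hrefs.append({
--             'type': href_type,
--             'id': temp_id
--         })
--     if has_pr:
--         norm_hrefs = [i for i in norm_hrefs if i['type'] == 'pr']
--     res = []
--     for href in norm_hrefs:
--         if ',%20' in href['id']:
--             temp = href['id'].split(',%20')
--             for i in temp:
--                 res.append({'type': href['type'], 'id': i})
--         else:
--             res.append(href)
--     return res
-- ===== SOURCE B (Python) =====
-- def normalize_href(hrefs: list[str]):
--     pull_url = 'https://github.com/pallets/flask/pull/'
--     issues_url = 'https://github.com/pallets/flask/issues/'
--     prs, issues = [], []
--     for href in hrefs: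
--         if pull_url in href:
--             prs.append(href.replace(pull_url, '').strip())
--         elif issues_url in href:
--             issues.append(href.replace(issues_url, '').strip())
--     ty, chosen = ('pr', prs) if prs else ('issue', issues)
--     res = []
--     for i in chosen:
--         if ',%20' in i:
--             res.extend({'type': ty, 'id': p} for p in i.split(',%20'))
--         else:
--             res.append({'type': ty, 'id': i})
--     return res
-- ===== Notes on version B (the rewrite author's own statement) =====
-- stated objective: simpler
-- what changed: One classification pass into two order-preserving lists (prs, issues) plus 'chosen = prs if prs else issues' replaces A's has_pr flag, interleaved dict list and post-hoc filter comprehension; expansion then runs over plain id strings with one fixed type instead of re-reading each dict's fields.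
import Mathlib
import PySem

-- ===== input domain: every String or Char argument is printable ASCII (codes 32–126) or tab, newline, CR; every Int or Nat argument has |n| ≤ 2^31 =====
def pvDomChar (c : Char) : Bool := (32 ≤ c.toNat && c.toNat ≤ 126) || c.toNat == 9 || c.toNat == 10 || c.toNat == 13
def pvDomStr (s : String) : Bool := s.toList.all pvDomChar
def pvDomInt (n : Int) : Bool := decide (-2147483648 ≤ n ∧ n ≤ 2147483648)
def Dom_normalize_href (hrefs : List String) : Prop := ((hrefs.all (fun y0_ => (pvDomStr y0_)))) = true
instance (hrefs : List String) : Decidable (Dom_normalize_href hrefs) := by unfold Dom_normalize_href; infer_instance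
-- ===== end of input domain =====

-- B: one classification pass into prs/issues lists and a chosen-list expansion replace A's has_pr flag + dict filter (simpler decomposition, same cost).


-- ===== PORT A =====
-- dict values are association lists; A's href['id'] / href['type'] lookups always hit a present key,
-- ported as Dict.getD (exact here since the keys exist in every dict A builds)
def pvPull : String := "https://github.com/pallets/flask/pull/"
def pvIssues : String := "https://github.com/pallets/flask/issues/"

def pvDGet (d : List (String × String)) (k : String) : String :=
  (PySem.Dict.mk d).getD k ""

def normalize_href (hrefs : List String) : List (List (String × String)) :=
  let st := hrefs.foldl
    (fun (st : List (List (String × String)) × Bool) href =>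
      if PySem.Str.isIn pvPull href then
        (st.1 ++ [[("type", "pr"), ("id", PySem.Str.strip (PySem.Str.replace href pvPull ""))]], true)
      else if PySem.Str.isIn pvIssues href then
        (st.1 ++ [[("type", "issue"), ("id", PySem.Str.strip (PySem.Str.replace href pvIssues ""))]], st.2)
      else st)
    ([], false)
  let norm := if st.2 then st.1.filter (fun i => pvDGet i "type" == "pr") else st.1
  norm.foldl
    (fun res href =>
      if PySem.Str.isIn ",%20" (pvDGet href "id") then
        -- split? is none only for sep = ""; sep is the literal ",%20", so .getD [] is exact
        res ++ ((PySem.Str.split? (pvDGet href "id") ",%20").getD []).map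
          (fun i => [("type", pvDGet href "type"), ("id", i)])
      else res ++ [href])
    []

-- ===== PORT B =====
def normalize_href_alt (hrefs : List String) : List (List (String × String)) :=
  let st := hrefs.foldl
    (fun (st : List String × List String) href =>
      if PySem.Str.isIn pvPull href then
        (st.1 ++ [PySem.Str.strip (PySem.Str.replace href pvPull "")], st.2)
      else if PySem.Str.isIn pvIssues href then
        (st.1, st.2 ++ [PySem.Str.strip (PySem.Str.replace href pvIssues "")])
      else st)
    ([], [])
  let tc := if st.1 ≠ [] then ("pr", st.1) else ("issue", st.2)
  tc.2.foldl
    (fun res i =>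
      if PySem.Str.isIn ",%20" i then
        res ++ ((PySem.Str.split? i ",%20").getD []).map (fun p => [("type", tc.1), ("id", p)])
      else res ++ [[("type", tc.1), ("id", i)]])
    []

-- ===== PRECONDITION & SPEC =====
def Spec_normalize_href (hrefs : List String) (out : List (List (String × String))) : Prop := out = normalize_href_alt hrefs
instance (hrefs : List String) (out : List (List (String × String))) : Decidable (Spec_normalize_href hrefs out) := by unfold Spec_normalize_href; infer_instance

-- ===== CLAIM (what is proved, stated in full; the proofs are below) =====
def Claim_equal_normalize_href : Prop := ∀ (hrefs : List String), Dom_normalize_href hrefs → Spec_normalize_href hrefs (normalize_href hrefs)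

-- ===== LEMMAS AND PROOFS =====

-- shared classification of one href (proof-side helper; not used by the ports)
def pvClassify (h : String) : Option (String × String) :=
  if PySem.Str.isIn pvPull h then some ("pr", PySem.Str.strip (PySem.Str.replace h pvPull ""))
  else if PySem.Str.isIn pvIssues h then some ("issue", PySem.Str.strip (PySem.Str.replace h pvIssues ""))
  else none

def pvMk (x : String × String) : List (String × String) := [("type", x.1), ("id", x.2)]

lemma pvDGet_mk_type (x : String × String) : pvDGet (pvMk x) "type" = x.1 := rfl
lemma pvDGet_mk_id (x : String × String) : pvDGet (pvMk x) "id" = x.2 := rfl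

lemma pvClassify_pr (h : String) (h1 : PySem.Str.isIn pvPull h = true) :
    pvClassify h = some ("pr", PySem.Str.strip (PySem.Str.replace h pvPull "")) := by
  unfold pvClassify; rw [if_pos h1]

lemma pvClassify_issue (h : String) (h1 : PySem.Str.isIn pvPull h = false)
    (h2 : PySem.Str.isIn pvIssues h = true) :
    pvClassify h = some ("issue", PySem.Str.strip (PySem.Str.replace h pvIssues "")) := by
  unfold pvClassify; rw [if_neg (by rw [h1]; simp), if_pos h2]

lemma pvClassify_none (h : String) (h1 : PySem.Str.isIn pvPull h = false)
    (h2 : PySem.Str.isIn pvIssues h = false) : pvClassify h = none := by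
  unfold pvClassify; rw [if_neg (by rw [h1]; simp), if_neg (by rw [h2]; simp)]

lemma pvFoldA (hrefs : List String) (acc : List (List (String × String))) (b : Bool) :
    hrefs.foldl
      (fun (st : List (List (String × String)) × Bool) href =>
        if PySem.Str.isIn pvPull href then
          (st.1 ++ [[("type", "pr"), ("id", PySem.Str.strip (PySem.Str.replace href pvPull ""))]], true)
        else if PySem.Str.isIn pvIssues href then
          (st.1 ++ [[("type", "issue"), ("id", PySem.Str.strip (PySem.Str.replace href pvIssues ""))]], st.2)
        else st)
      (acc, b)
    = (acc ++ (hrefs.filterMap pvClassify).map pvMk,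
       b || hrefs.any (fun h => PySem.Str.isIn pvPull h)) := by
  induction hrefs generalizing acc b with
  | nil => simp
  | cons h t ih =>
    simp only [List.foldl_cons, List.filterMap_cons, List.any_cons]
    cases h1 : PySem.Str.isIn pvPull h with
    | true =>
      rw [if_pos rfl, pvClassify_pr h h1, ih]
      simp [pvMk]
    | false =>
      rw [if_neg (by simp)]
      cases h2 : PySem.Str.isIn pvIssues h with
      | true => rw [if_pos rfl, pvClassify_issue h h1 h2, ih]; simp [pvMk]
      | false => rw [if_neg (by simp), pvClassify_none h h1 h2, ih]; simp

lemma pvFoldB (hrefs : List String) (p q : List String) :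
    hrefs.foldl
      (fun (st : List String × List String) href =>
        if PySem.Str.isIn pvPull href then
          (st.1 ++ [PySem.Str.strip (PySem.Str.replace href pvPull "")], st.2)
        else if PySem.Str.isIn pvIssues href then
          (st.1, st.2 ++ [PySem.Str.strip (PySem.Str.replace href pvIssues "")])
        else st)
      (p, q)
    = (p ++ (((hrefs.filterMap pvClassify).filter (fun x => x.1 == "pr")).map (·.2)),
       q ++ (((hrefs.filterMap pvClassify).filter (fun x => x.1 == "issue")).map (·.2))) := by
  induction hrefs generalizing p q with
  | nil => simp
  | cons h t ih =>
    simp only [List.foldl_cons, List.filterMap_cons]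
    cases h1 : PySem.Str.isIn pvPull h with
    | true =>
      rw [if_pos rfl, pvClassify_pr h h1, ih]
      simp [(by decide : (("pr" : String) == "issue") = false)]
    | false =>
      rw [if_neg (by simp)]
      cases h2 : PySem.Str.isIn pvIssues h with
      | true =>
        rw [if_pos rfl, pvClassify_issue h h1 h2, ih]
        simp [(by decide : (("issue" : String) == "pr") = false)]
      | false => rw [if_neg (by simp), pvClassify_none h h1 h2, ih]

lemma pvAnyPull (hrefs : List String) :
    hrefs.any (fun h => PySem.Str.isIn pvPull h)
      = !(((hrefs.filterMap pvClassify).filter (fun x => x.1 == "pr")).isEmpty) := by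
  induction hrefs with
  | nil => simp
  | cons h t ih =>
    simp only [List.any_cons, List.filterMap_cons]
    cases h1 : PySem.Str.isIn pvPull h with
    | true =>
      rw [pvClassify_pr h h1]
      simp
    | false =>
      cases h2 : PySem.Str.isIn pvIssues h with
      | true =>
        rw [pvClassify_issue h h1 h2]
        simpa [(by decide : (("issue" : String) == "pr") = false)] using ih
      | false => rw [pvClassify_none h h1 h2]; simpa using ih

lemma pvClassify_fst (hrefs : List String) (x : String × String)
    (hx : x ∈ hrefs.filterMap pvClassify) : x.1 = "pr" ∨ x.1 = "issue" := by
  rcases List.mem_filterMap.mp hx with ⟨h, -, hc⟩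
  unfold pvClassify at hc
  split_ifs at hc
  · obtain rfl := Option.some.inj hc; exact Or.inl rfl
  · obtain rfl := Option.some.inj hc; exact Or.inr rfl

lemma pvFoldExpand (l : List (String × String)) (t : String)
    (ht : ∀ x ∈ l, x.1 = t) :
    ((l.map pvMk).foldl
      (fun res href =>
        if PySem.Str.isIn ",%20" (pvDGet href "id") then
          res ++ ((PySem.Str.split? (pvDGet href "id") ",%20").getD []).map
            (fun i => [("type", pvDGet href "type"), ("id", i)])
        else res ++ [href])
      [])
    = ((l.map (·.2)).foldl
      (fun res i =>
        if PySem.Str.isIn ",%20" i then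
          res ++ ((PySem.Str.split? i ",%20").getD []).map (fun p => [("type", t), ("id", p)])
        else res ++ [[("type", t), ("id", i)]])
      []) := by
  induction l using List.reverseRecOn with
  | nil => simp
  | append_singleton l x ih =>
    have hx : x.1 = t := ht x (by simp)
    have hl : ∀ y ∈ l, y.1 = t := fun y hy => ht y (by simp [hy])
    simp only [List.map_append, List.map_cons, List.map_nil, List.foldl_append,
      List.foldl_cons, List.foldl_nil, ih hl]
    rw [pvDGet_mk_id, pvDGet_mk_type, hx]
    split_ifs <;> simp [pvMk, hx]


-- ===== VERDICT (by name: the statement is the Claim_ definition above) =====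
theorem normalize_href_spec : Claim_equal_normalize_href := by
  intro hrefs _
  unfold Spec_normalize_href normalize_href normalize_href_alt
  simp only [pvFoldA, pvFoldB, pvAnyPull, List.nil_append, Bool.false_or]
  set L := hrefs.filterMap pvClassify with hL
  by_cases hpr : ((L.filter (fun x => x.1 == "pr")).isEmpty) = true
  · -- no PR href: A keeps norm unfiltered, B expands the issues list
    have hfp : L.filter (fun x => x.1 == "pr") = [] := List.isEmpty_iff.mp hpr
    have hallI : ∀ x ∈ L, x.1 = "issue" := by
      intro x hx
      rcases pvClassify_fst hrefs x hx with h | h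
      · exfalso
        have hm : x ∈ L.filter (fun x => x.1 == "pr") :=
          List.mem_filter.mpr ⟨hx, by simp [h]⟩
        rw [hfp] at hm; exact List.not_mem_nil hm
      · exact h
    have hfil : L.filter (fun x => x.1 == "issue") = L :=
      List.filter_eq_self.mpr (fun x hx => by simp [hallI x hx])
    rw [hfp, hfil]
    simpa using pvFoldExpand L "issue" hallI
  · -- some PR href: A filters norm to type 'pr', B expands the prs list
    have hprf : (L.filter (fun x => x.1 == "pr")).isEmpty = false :=
      Bool.not_eq_true _ ▸ eq_false_of_ne_true hpr
    have hne : L.filter (fun x => x.1 == "pr") ≠ [] := by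
      intro h; rw [h] at hprf; simp at hprf
    have hne2 : ((L.filter (fun x => x.1 == "pr")).map (·.2)) ≠ [] := by
      simpa [List.map_eq_nil_iff] using hne
    rw [hprf]
    rw [if_pos (by simp), if_pos hne2]
    rw [List.filter_map]
    have hcomp : ((fun i => pvDGet i "type" == "pr") ∘ pvMk) = (fun x => x.1 == "pr") := by
      funext x; simp [Function.comp, pvDGet_mk_type]
    rw [hcomp]
    simpa using pvFoldExpand (L.filter (fun x => x.1 == "pr")) "pr" (fun x hx => by
      have := (List.mem_filter.mp hx).2; simpa using this)
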